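-- pv_equiv track=rewrite | github.com/balbasty/braindataprep | braindataprep/datasets/OASIS/III/keys.py | upper_keys
-- ===== SOURCE A (Python) =====
-- allkeys: dict = {
--     "raw": {
--         "mri": {
--             "anat": {"T1w", "T2w", "TSE", "FLAIR", "T2star", "angio", "swi"},
--             "func": {"bold"},
--             "perf": {"pasl", "asl"},
--             "": {"fmap", "fieldmap", "dwi"}
--         },
--         "pet": {"FDG", "PIB", "AV45", "AV1451"},
--         "ct": {"CT"},
--     },
--     "derivatives": {"fs", "fs-all", "pup"},
--     "meta": {"pheno"},
-- }
--
-- def upper_keys(key: str) -> set[str]: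
--     """Return all keys that are above `key` in the hierarchy"""
--     def _impl(x):
--         if isinstance(x, dict):
--             if key in x.keys():
--                 return {key}
--             else:
--                 keys = set()
--                 for k, v in x.items():
--                     v = _impl(v)
--                     if v:
--                         keys = keys.union({k}, v)
--                 return keys
--         else:
--             if isinstance(x, str):
--                 x = {x}
--             assert isinstance(x, set)
--             if key in x:
--                 return {key}
--             else:
--                 return set()
--     keys = _impl(allkeys)
--     keys.discard("")
--     return keys
-- ===== SOURCE B (Python) =====
-- # Parent-pointer index: map each node to its immediate parent (roots -> None),
-- # then walk upward from the key instead of searching the tree downward.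
-- PARENT = {
--     "raw": None, "derivatives": None, "meta": None,
--     "mri": "raw", "pet": "raw", "ct": "raw",
--     "anat": "mri", "func": "mri", "perf": "mri", "": "mri",
--     "T1w": "anat", "T2w": "anat", "TSE": "anat", "FLAIR": "anat",
--     "T2star": "anat", "angio": "anat", "swi": "anat",
--     "bold": "func",
--     "pasl": "perf", "asl": "perf",
--     "fmap": "", "fieldmap": "", "dwi": "",
--     "FDG": "pet", "PIB": "pet", "AV45": "pet", "AV1451": "pet",
--     "CT": "ct",
--     "fs": "derivatives", "fs-all": "derivatives", "pup": "derivatives",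
--     "pheno": "meta",
-- }
--
-- def upper_keys(key: str) -> set[str]:
--     """Return all keys that are above `key` in the hierarchy"""
--     if key not in PARENT:
--         return set()
--     path = []
--     k = key
--     while k is not None:
--         path.append(k)
--         k = PARENT[k]
--     return set(reversed(path)) - {""}
-- ===== Notes on version B (the rewrite author's own statement) =====
-- stated objective: alternative
-- what changed: B precomputes a child-to-parent index of the fixed hierarchy and walks upward from the key along parent pointers, instead of A's recursive downward search of the whole nested dict/set tree with set unions at every level.
import Mathlib
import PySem

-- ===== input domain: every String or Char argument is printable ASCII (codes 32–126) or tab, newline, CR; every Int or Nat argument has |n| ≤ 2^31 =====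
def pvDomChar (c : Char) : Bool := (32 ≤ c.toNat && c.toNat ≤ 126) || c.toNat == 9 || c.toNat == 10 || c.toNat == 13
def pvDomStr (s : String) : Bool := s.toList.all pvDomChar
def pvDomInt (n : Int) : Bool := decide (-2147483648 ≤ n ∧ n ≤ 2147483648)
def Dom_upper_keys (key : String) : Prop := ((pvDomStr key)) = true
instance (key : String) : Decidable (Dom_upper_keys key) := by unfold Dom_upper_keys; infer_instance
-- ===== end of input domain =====

-- B replaces A's recursive downward search of the hierarchy by a precomputed
-- parent-pointer index walked upward from the key (alternative decomposition).


-- ===== PORT A =====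
-- The module-level tree `allkeys`: dicts of dicts, with Python sets of strings at the
-- leaves (no bare-string leaves occur, so `_impl`'s str→set coercion branch has no
-- counterpart here). Nested dicts are an explicit mutual child-list type (no nested inductive).
mutual
inductive PNode where
  | pset : List String → PNode      -- a Python set of strings (leaf)
  | pdict : PDict → PNode           -- a Python dict
inductive PDict where
  | nil : PDict
  | cons : String → PNode → PDict → PDict
end

def pdictKeys : PDict → List String
  | .nil => []
  | .cons k _ rest => k :: pdictKeys rest

-- Python set.union in insertion order: keep `a`, append the members of `b` not in `a`.
def setUnion (a b : List String) : List String := a ++ b.filter (fun x => !a.contains x)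

mutual
-- `_impl(x)` on a dict / set node
def implNode (key : String) : PNode → List String
  | .pset l => if key ∈ l then [key] else []          -- `if key in x: {key} else set()`
  | .pdict d =>
      if key ∈ pdictKeys d then [key]                 -- `if key in x.keys(): {key}`
      else implFold key d []                          -- the accumulating for-loop
-- `keys = set(); for k, v in x.items(): v = _impl(v); if v: keys = keys.union({k}, v)`
def implFold (key : String) (d : PDict) (keys : List String) : List String :=
  match d with
  | .nil => keys
  | .cons k v rest =>
      let r := implNode key v
      implFold key rest (if r ≠ [] then setUnion keys (k :: r) else keys)
end

def allkeysTree : PNode :=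
  .pdict (.cons "raw"
    (.pdict (.cons "mri"
      (.pdict (.cons "anat" (.pset ["T1w", "T2w", "TSE", "FLAIR", "T2star", "angio", "swi"])
        (.cons "func" (.pset ["bold"])
        (.cons "perf" (.pset ["pasl", "asl"])
        (.cons "" (.pset ["fmap", "fieldmap", "dwi"]) .nil)))))
      (.cons "pet" (.pset ["FDG", "PIB", "AV45", "AV1451"])
      (.cons "ct" (.pset ["CT"]) .nil))))
    (.cons "derivatives" (.pset ["fs", "fs-all", "pup"])
    (.cons "meta" (.pset ["pheno"]) .nil)))

def upper_keys (key : String) : List String :=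
  (implNode key allkeysTree).filter (fun s => !(s == ""))   -- keys.discard("")

-- ===== PORT B =====
-- PARENT: each node mapped to its immediate parent; roots map to None.
def parentPairs : List (String × Option String) :=
  [("raw", none), ("derivatives", none), ("meta", none),
   ("mri", some "raw"), ("pet", some "raw"), ("ct", some "raw"),
   ("anat", some "mri"), ("func", some "mri"), ("perf", some "mri"), ("", some "mri"),
   ("T1w", some "anat"), ("T2w", some "anat"), ("TSE", some "anat"), ("FLAIR", some "anat"),
   ("T2star", some "anat"), ("angio", some "anat"), ("swi", some "anat"),
   ("bold", some "func"),
   ("pasl", some "perf"), ("asl", some "perf"),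
   ("fmap", some ""), ("fieldmap", some ""), ("dwi", some ""),
   ("FDG", some "pet"), ("PIB", some "pet"), ("AV45", some "pet"), ("AV1451", some "pet"),
   ("CT", some "ct"),
   ("fs", some "derivatives"), ("fs-all", some "derivatives"), ("pup", some "derivatives"),
   ("pheno", some "meta")]

def parentDict : PySem.Dict String (Option String) := PySem.Dict.mk parentPairs

-- `while k is not None: path.append(k); k = PARENT[k]`, then `reversed(path)`:
-- prepending while walking up builds the reversed path directly.  The while loop runs at
-- most `len(PARENT)` times (each parent is an earlier entry), so that is the fuel; the
-- `none` (missing key) case is unreachable for keys in PARENT.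
def walkUp (fuel : Nat) (k : String) (acc : List String) : List String :=
  match fuel with
  | 0 => acc
  | n + 1 =>
    match parentDict.get? k with
    | some (some p) => walkUp n p (k :: acc)
    | some none => k :: acc
    | none => acc

def upper_keys_alt (key : String) : List String :=
  if parentDict.contains key then
    (walkUp parentPairs.length key []).filter (fun s => !(s == ""))   -- … - {""}
  else []                                                             -- key not in PARENT

-- ===== PRECONDITION & SPEC =====
def Spec_upper_keys (key : String) (out : List String) : Prop := out = upper_keys_alt key
instance (key : String) (out : List String) : Decidable (Spec_upper_keys key out) := by unfold Spec_upper_keys; infer_instance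

-- ===== CLAIM (what is proved, stated in full; the proofs are below) =====
def Claim_equal_upper_keys : Prop := ∀ (key : String), Dom_upper_keys key → Spec_upper_keys key (upper_keys key)

-- ===== LEMMAS AND PROOFS =====

-- all node names of the hierarchy = the keys of PARENT
def hierNames : List String := parentPairs.map Prod.fst

mutual
def pnodeNames : PNode → List String
  | .pset l => l
  | .pdict d => pdictAllNames d
def pdictAllNames : PDict → List String
  | .nil => []
  | .cons k v rest => k :: (pnodeNames v ++ pdictAllNames rest)
end

theorem pdictKeys_subset : (d : PDict) → ∀ x, x ∈ pdictKeys d → x ∈ pdictAllNames d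
  | .nil, x, h => absurd h (by simp [pdictKeys])
  | .cons k v rest, x, h => by
      simp only [pdictKeys, List.mem_cons] at h
      rcases h with h | h
      · simp [pdictAllNames, h]
      · simp only [pdictAllNames, List.mem_cons, List.mem_append]
        right; right; exact pdictKeys_subset rest x h

mutual
theorem implNode_not_mem (key : String) : (t : PNode) → key ∉ pnodeNames t → implNode key t = []
  | .pset l, h => by simp only [pnodeNames] at h; simp [implNode, h]
  | .pdict d, h => by
      have hk : key ∉ pdictKeys d := fun hm => h (by simpa [pnodeNames] using pdictKeys_subset d key hm)
      simp only [implNode, if_neg hk]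
      exact implFold_not_mem key d [] (by simpa [pnodeNames] using h)
theorem implFold_not_mem (key : String) : (d : PDict) → (acc : List String) → key ∉ pdictAllNames d → implFold key d acc = acc
  | .nil, acc, _ => rfl
  | .cons k v rest, acc, h => by
      simp only [pdictAllNames, List.mem_cons, List.mem_append, not_or] at h
      have hv : implNode key v = [] := implNode_not_mem key v h.2.1
      simp only [implFold, hv, ne_eq, not_true_eq_false]
      simp only [reduceIte]
      exact implFold_not_mem key rest acc h.2.2
end

theorem main_eq (key : String) : upper_keys key = upper_keys_alt key := by
  by_cases h : key ∈ hierNames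
  · fin_cases h <;> rfl
  · -- key names nothing in the hierarchy: both sides return []
    have htree : key ∉ pnodeNames allkeysTree := fun hm => h (by
      have sub : ∀ x ∈ pnodeNames allkeysTree, x ∈ hierNames := by decide
      exact sub key hm)
    have hc : parentDict.contains key = false := by
      have : key ∉ parentDict.keys := by simpa [parentDict, hierNames, parentPairs] using h
      simpa [PySem.Dict.contains_eq_decide_mem_keys] using this
    simp [upper_keys, upper_keys_alt, hc, implNode_not_mem key allkeysTree htree]

-- ===== VERDICT (by name: the statement is the Claim_ definition above) =====
theorem upper_keys_spec : Claim_equal_upper_keys := by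
  intro key _
  unfold Spec_upper_keys
  exact main_eq key
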